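-- pv_equiv track=rewrite | github.com/AlainJoss/foodweb-robustness-analysis | robustness_analysis/Perturbation.py | _expand_list_based_on_graph_size
-- ===== SOURCE A (Python) =====
-- from collections import defaultdict
--
-- def _expand_list_based_on_graph_size(metric_evolution: dict) -> dict:
--     """
--     Expands the metric evolution list based on the graph size. This is useful
--     for visualizing the evolution over consistent time steps.
--
--     Parameters:
--     -----------
--     metric_evolution : dict
--         The original metric evolution dictionary.
--
--     Returns:
--     --------
--     dict
--         The expanded metric evolution.
--
--     Example:
--     --------
--     index: [0, 1, 2, ...]
--     {
--         'graph_size' = [100, 97, 96, ...]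
--         'avg_degree' = [7, 3, 5, ...]
--     }
--
--     after _expand_list_based_on_graph_size:
--
--     index: [0, 1, 2, 3, 4, ...]
--     {
--         'graph_size' = [100, 100, 100, 97, 96, ...]
--         'avg_degree' = [7, 7, 7, 3, 5, ...]
--     }
--     """
--     graph_size_list = metric_evolution['graph_size']
--     expanded_dict = defaultdict(list)
--
--     for i in range(len(graph_size_list) - 1):
--         diff = graph_size_list[i] - graph_size_list[i+1] - 1
--         for key, value_list in metric_evolution.items():
--             for _ in range(diff + 1):
--                 expanded_dict[key].append(value_list[i])
--
--     for key, value_list in metric_evolution.items():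
--         expanded_dict[key].append(value_list[-1])
--
--     return expanded_dict
-- ===== SOURCE B (Python) =====
-- from collections import defaultdict
--
--
-- def _expand_list_based_on_graph_size(metric_evolution: dict) -> dict:
--     graph_size_list = metric_evolution['graph_size']
--     # Flat schedule of source indices: index i appears once per unit drop in
--     # graph size, then -1 selects the final element of every list.
--     schedule = [i
--                 for i in range(len(graph_size_list) - 1)
--                 for _ in range(graph_size_list[i] - graph_size_list[i + 1])]
--     schedule.append(-1)
--     expanded_dict = defaultdict(list)
--     for key, value_list in metric_evolution.items():
--         expanded_dict[key] = [value_list[j] for j in schedule]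
--     return expanded_dict
-- ===== Notes on version B (the rewrite author's own statement) =====
-- stated objective: alternative
-- what changed: A interleaves all keys inside one index loop, growing every defaultdict entry element by element with repeated appends; B precomputes a single flat gather schedule of source indices (each index repeated per unit graph-size drop, plus -1 for the last element) and produces each key's whole expanded list in one comprehension that indexes through that schedule.
import Mathlib
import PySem

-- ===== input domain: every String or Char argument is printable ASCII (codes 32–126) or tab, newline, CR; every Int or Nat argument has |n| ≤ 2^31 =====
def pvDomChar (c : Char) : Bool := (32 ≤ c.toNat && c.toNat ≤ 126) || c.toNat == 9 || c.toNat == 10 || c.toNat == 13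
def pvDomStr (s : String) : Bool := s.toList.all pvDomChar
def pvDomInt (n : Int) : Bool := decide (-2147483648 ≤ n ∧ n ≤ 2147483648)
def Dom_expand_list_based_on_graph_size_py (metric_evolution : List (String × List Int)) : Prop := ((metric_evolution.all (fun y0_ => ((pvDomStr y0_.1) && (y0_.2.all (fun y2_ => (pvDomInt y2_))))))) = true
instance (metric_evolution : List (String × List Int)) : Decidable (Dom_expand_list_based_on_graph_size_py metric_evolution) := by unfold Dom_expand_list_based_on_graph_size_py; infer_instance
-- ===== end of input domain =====

-- B replaces A's interleaved index-outer/key-inner append loops by a single precomputed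
-- gather schedule of source indices applied per key (alternative decomposition, same cost).


-- ===== PORT A =====
-- metric_evolution['graph_size']: first-match association-list lookup (KeyError when absent is excluded by Pre_)
def expand_list_based_on_graph_size_py (metric_evolution : List (String × List Int)) : List (String × List Int) :=
  let graph_size_list := (List.lookup "graph_size" metric_evolution).getD []
  let expanded₁ : PySem.Dict String (List Int) :=
    (PySem.List.pyRange 0 ((graph_size_list.length : Int) - 1) 1).foldl (fun d i =>
      let diff := PySem.List.pyGetD graph_size_list i 0 - PySem.List.pyGetD graph_size_list (i + 1) 0 - 1
      metric_evolution.foldl (fun d p =>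
        (PySem.List.pyRange 0 (diff + 1) 1).foldl (fun d _ =>
          d.modify p.1 [] (· ++ [PySem.List.pyGetD p.2 i 0])) d) d) PySem.Dict.empty
  let expanded₂ := metric_evolution.foldl (fun d p =>
      d.modify p.1 [] (· ++ [PySem.List.pyGetD p.2 (-1) 0])) expanded₁
  expanded₂.items

-- ===== PORT B =====
def expand_list_based_on_graph_size_py_alt (metric_evolution : List (String × List Int)) : List (String × List Int) :=
  let graph_size_list := (List.lookup "graph_size" metric_evolution).getD []
  let schedule := ((PySem.List.pyRange 0 ((graph_size_list.length : Int) - 1) 1).flatMap (fun i =>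
      (PySem.List.pyRange 0 (PySem.List.pyGetD graph_size_list i 0 - PySem.List.pyGetD graph_size_list (i + 1) 0) 1).map
        (fun _ => i))) ++ [-1]
  let d := metric_evolution.foldl (fun d p =>
      d.insert p.1 (schedule.map (fun j => PySem.List.pyGetD p.2 j 0))) PySem.Dict.empty
  d.items

-- ===== PRECONDITION & SPEC =====
-- Pre_ excludes exactly the inputs where A raises (missing 'graph_size' key → KeyError; an empty value
-- list, or a value list not indexable at some i with graph_size[i] > graph_size[i+1] → IndexError), and
-- association lists with duplicate keys, which cannot arise from a Python dict argument.
def Pre_expand_list_based_on_graph_size_py (metric_evolution : List (String × List Int)) : Prop :=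
  (metric_evolution.map (·.1)).Nodup ∧ "graph_size" ∈ metric_evolution.map (·.1) ∧
  ∀ p ∈ metric_evolution, p.2 ≠ [] ∧
    ∀ j ∈ List.range (((List.lookup "graph_size" metric_evolution).getD []).length - 1),
      0 < ((List.lookup "graph_size" metric_evolution).getD []).getD j 0 -
          ((List.lookup "graph_size" metric_evolution).getD []).getD (j + 1) 0 →
      j < p.2.length
instance (metric_evolution : List (String × List Int)) : Decidable (Pre_expand_list_based_on_graph_size_py metric_evolution) := by unfold Pre_expand_list_based_on_graph_size_py; infer_instance

def pvWitness_expand_list_based_on_graph_size_py : (List (String × List Int)) := [("graph_size", [3, 1]), ("avg_degree", [7, 2])]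

def Spec_expand_list_based_on_graph_size_py (metric_evolution : List (String × List Int)) (out : List (String × List Int)) : Prop := out = expand_list_based_on_graph_size_py_alt metric_evolution
instance (metric_evolution : List (String × List Int)) (out : List (String × List Int)) : Decidable (Spec_expand_list_based_on_graph_size_py metric_evolution out) := by unfold Spec_expand_list_based_on_graph_size_py; infer_instance

-- ===== CLAIM (what is proved, stated in full; the proofs are below) =====
def Claim_equal_expand_list_based_on_graph_size_py : Prop := ∀ (metric_evolution : List (String × List Int)), Dom_expand_list_based_on_graph_size_py metric_evolution → Pre_expand_list_based_on_graph_size_py metric_evolution → Spec_expand_list_based_on_graph_size_py metric_evolution (expand_list_based_on_graph_size_py metric_evolution)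

-- ===== LEMMAS AND PROOFS =====

theorem pv_filter_eq_single (m : List (String × List Int)) (hnd : (m.map (·.1)).Nodup)
    (k : String) (v : List Int) (h : (k, v) ∈ m) :
    m.filter (fun p => p.1 == k) = [(k, v)] := by
  induction m with
  | nil => cases h
  | cons q t ih =>
    simp only [List.map_cons, List.nodup_cons] at hnd
    rcases List.mem_cons.mp h with hq | ht
    · subst hq
      simp only [List.filter_cons, beq_self_eq_true, if_pos]
      simp only [List.cons.injEq, true_and]
      rw [List.filter_eq_nil_iff]
      intro p hp hbeq
      exact hnd.1 (by simpa [eq_of_beq hbeq] using List.mem_map_of_mem (f := (·.1)) hp)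
    · have hne : q.1 ≠ k := by
        intro hq1
        exact hnd.1 (hq1 ▸ by simpa using List.mem_map_of_mem (f := (·.1)) ht)
      simp only [List.filter_cons]
      rw [if_neg (by simpa using hne)]
      exact ih hnd.2 ht

theorem pv_inner_getD (r : List Int) (k k' : String) (x : Int) (d : PySem.Dict String (List Int)) :
    (r.foldl (fun d _ => d.modify k [] (· ++ [x])) d).getD k' [] =
      d.getD k' [] ++ (if k' = k then List.replicate r.length x else []) := by
  induction r generalizing d with
  | nil => simp
  | cons a t ih =>
    simp only [List.foldl_cons, ih, PySem.Dict.getD_modify, List.length_cons]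
    by_cases hk : k' = k
    · simp [hk, List.replicate_succ]
    · simp [hk]

theorem pv_pass_getD (l : List (String × List Int)) (r : List Int) (x : (String × List Int) → Int)
    (k' : String) (d : PySem.Dict String (List Int)) :
    (l.foldl (fun d p => r.foldl (fun d _ => d.modify p.1 [] (· ++ [x p])) d) d).getD k' [] =
      d.getD k' [] ++ ((l.filter (fun p => p.1 == k')).map (fun p => List.replicate r.length (x p))).flatten := by
  induction l generalizing d with
  | nil => simp
  | cons p t ih =>
    simp only [List.foldl_cons, ih, pv_inner_getD, List.filter_cons]
    by_cases hk : p.1 = k'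
    · simp [hk, List.append_assoc]
    · simp [hk, Ne.symm hk]

theorem pv_update_replicate (s : PySem.Set String) (a : String) (n : Nat) :
    PySem.Set.update s (List.replicate (n + 1) a) = s.add a := by
  induction n generalizing s with
  | zero => simp [List.replicate, PySem.Set.update_cons, PySem.Set.update_nil]
  | succ n ih =>
    rw [List.replicate_succ, PySem.Set.update_cons, ih,
      PySem.Set.add_of_mem (by simp [PySem.Set.mem_add])]

theorem pv_pass_keys (l : List (String × List Int)) (r : List Int) (x : (String × List Int) → Int)
    (d : PySem.Dict String (List Int)) :
    (l.foldl (fun d p => r.foldl (fun d _ => d.modify p.1 [] (· ++ [x p])) d) d).keys =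
      if r = [] then d.keys else PySem.Set.update d.keys (l.map (·.1)) := by
  induction l generalizing d with
  | nil =>
    by_cases hr : r = [] <;> simp [hr, PySem.Set.update_nil]
  | cons p t ih =>
    cases r with
    | nil => exact ih (d := d)
    | cons a rt =>
      rw [List.foldl_cons, ih, if_neg (List.cons_ne_nil a rt)]
      have hkeys : ((a :: rt).foldl (fun d _ => d.modify p.1 [] (· ++ [x p])) d).keys
          = PySem.Set.add d.keys p.1 := by
        rw [PySem.Dict.keys_foldl_modify_key (a :: rt) (fun _ => p.1) []
          (fun d _ => (· ++ [x p])) d]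
        have hmap : (a :: rt).map (fun _ => p.1) = List.replicate (rt.length + 1) p.1 := by
          simp [List.map_const', List.replicate_succ]
        rw [hmap, pv_update_replicate]
      rw [hkeys, List.map_cons, PySem.Set.update_cons]
      rw [if_neg (List.cons_ne_nil a rt)]

theorem pv_update_self (s : PySem.Set String) (ks : List String) (h : ∀ y ∈ ks, y ∈ s) :
    PySem.Set.update s ks = s := by
  rw [PySem.Set.update_eq_append_filter]
  simp
  exact h

theorem pv_mem_update (s : PySem.Set String) (ks : List String) (y : String) (h : y ∈ ks) :
    y ∈ PySem.Set.update s ks := by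
  rw [PySem.Set.update_eq_append_filter]
  by_cases hs : y ∈ s
  · exact List.mem_append_left _ hs
  · refine List.mem_append_right _ ?_
    rw [List.mem_filter]
    constructor
    · exact (PySem.Set.mem_ofList ks y).mpr h
    · simp
      exact hs

theorem pv_outer_getD (m : List (String × List Int)) (gs : List Int)
    (hnd : (m.map (·.1)).Nodup) (k : String) (v : List Int) (hkv : (k, v) ∈ m)
    (rs : List Int) (d : PySem.Dict String (List Int)) :
    (rs.foldl (fun d i =>
        m.foldl (fun d p =>
          (PySem.List.pyRange 0 (PySem.List.pyGetD gs i 0 - PySem.List.pyGetD gs (i + 1) 0 - 1 + 1) 1).foldl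
            (fun d _ => d.modify p.1 [] (· ++ [PySem.List.pyGetD p.2 i 0])) d) d) d).getD k [] =
      d.getD k [] ++ (rs.map (fun i =>
        List.replicate (PySem.List.pyGetD gs i 0 - PySem.List.pyGetD gs (i + 1) 0).toNat
          (PySem.List.pyGetD v i 0))).flatten := by
  induction rs generalizing d with
  | nil => simp
  | cons i it ih =>
    rw [List.foldl_cons, ih, pv_pass_getD, pv_filter_eq_single m hnd k v hkv]
    simp [PySem.List.length_pyRange_one]

theorem pv_outer_keys (m : List (String × List Int)) (gs : List Int)
    (rs : List Int) (d : PySem.Dict String (List Int)) :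
    (rs.foldl (fun d i =>
        m.foldl (fun d p =>
          (PySem.List.pyRange 0 (PySem.List.pyGetD gs i 0 - PySem.List.pyGetD gs (i + 1) 0 - 1 + 1) 1).foldl
            (fun d _ => d.modify p.1 [] (· ++ [PySem.List.pyGetD p.2 i 0])) d) d) d).keys = d.keys ∨
    (rs.foldl (fun d i =>
        m.foldl (fun d p =>
          (PySem.List.pyRange 0 (PySem.List.pyGetD gs i 0 - PySem.List.pyGetD gs (i + 1) 0 - 1 + 1) 1).foldl
            (fun d _ => d.modify p.1 [] (· ++ [PySem.List.pyGetD p.2 i 0])) d) d) d).keys =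
      PySem.Set.update d.keys (m.map (·.1)) := by
  induction rs generalizing d with
  | nil => left; rfl
  | cons i it ih =>
    rw [List.foldl_cons]
    set d' := m.foldl (fun d p =>
          (PySem.List.pyRange 0 (PySem.List.pyGetD gs i 0 - PySem.List.pyGetD gs (i + 1) 0 - 1 + 1) 1).foldl
            (fun d _ => d.modify p.1 [] (· ++ [PySem.List.pyGetD p.2 i 0])) d) d with hd'
    have hk' : d'.keys = d.keys ∨ d'.keys = PySem.Set.update d.keys (m.map (·.1)) := by
      rw [hd', pv_pass_keys]
      by_cases hr : PySem.List.pyRange 0 (PySem.List.pyGetD gs i 0 - PySem.List.pyGetD gs (i + 1) 0 - 1 + 1) 1 = []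
      · left; rw [if_pos hr]
      · right; rw [if_neg hr]
    rcases ih (d := d') with h | h <;> rcases hk' with h2 | h2
    · left; rw [h, h2]
    · right; rw [h, h2]
    · right; rw [h, h2]
    · right; rw [h, h2, pv_update_self]
      intro y hy
      exact pv_mem_update _ _ _ hy

theorem pv_expand_eq (gs v : List Int) :
    ((PySem.List.pyRange 0 ((gs.length : Int) - 1) 1).map (fun i =>
        List.replicate (PySem.List.pyGetD gs i 0 - PySem.List.pyGetD gs (i + 1) 0).toNat
          (PySem.List.pyGetD v i 0))).flatten =
      ((PySem.List.pyRange 0 ((gs.length : Int) - 1) 1).flatMap (fun i =>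
          (PySem.List.pyRange 0 (PySem.List.pyGetD gs i 0 - PySem.List.pyGetD gs (i + 1) 0) 1).map
            (fun _ => i))).map (fun j => PySem.List.pyGetD v j 0) := by
  rw [← List.flatMap_def, List.map_flatMap]
  refine List.flatMap_congr ?_
  intro i _
  rw [List.map_map]
  have : ((fun j => PySem.List.pyGetD v j 0) ∘ fun _ => i) = fun (_ : Int) => PySem.List.pyGetD v i 0 := rfl
  rw [this, List.map_const', PySem.List.length_pyRange_one]
  congr 1
  omega

-- ===== VERDICT (by name: the statement is the Claim_ definition above) =====
theorem expand_list_based_on_graph_size_py_spec : Claim_equal_expand_list_based_on_graph_size_py := by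
  intro m hdom hpre
  obtain ⟨hnd, hgsmem, hall⟩ := hpre
  unfold Spec_expand_list_based_on_graph_size_py
  simp only [expand_list_based_on_graph_size_py, expand_list_based_on_graph_size_py_alt]
  set gs := (List.lookup "graph_size" m).getD [] with hgsdef
  set sched := ((PySem.List.pyRange 0 ((gs.length : Int) - 1) 1).flatMap (fun i =>
      (PySem.List.pyRange 0 (PySem.List.pyGetD gs i 0 - PySem.List.pyGetD gs (i + 1) 0) 1).map
        (fun _ => i))) ++ [-1] with hsched
  -- B side: one insert per distinct key appends in order
  rw [PySem.Dict.items_foldl_insert_fresh m (fun p => p.1)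
        (fun p => sched.map (fun j => PySem.List.pyGetD p.2 j 0))
        PySem.Dict.empty (by intro a _; simp) hnd]
  have hitemsE : (PySem.Dict.empty : PySem.Dict String (List Int)).items = [] := rfl
  rw [hitemsE, List.nil_append]
  -- name A's intermediate dicts
  set d1 := (PySem.List.pyRange 0 ((gs.length : Int) - 1) 1).foldl (fun d i =>
      m.foldl (fun d p =>
        (PySem.List.pyRange 0 (PySem.List.pyGetD gs i 0 - PySem.List.pyGetD gs (i + 1) 0 - 1 + 1) 1).foldl
          (fun d _ => d.modify p.1 [] (· ++ [PySem.List.pyGetD p.2 i 0])) d) d) PySem.Dict.empty with hd1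
  set d2 := m.foldl (fun d p => d.modify p.1 [] (· ++ [PySem.List.pyGetD p.2 (-1) 0])) d1 with hd2
  have hupd : PySem.Set.update ([] : PySem.Set String) (m.map (·.1)) = m.map (·.1) := by
    rw [show ([] : PySem.Set String) = PySem.Set.empty from rfl, PySem.Set.update_empty,
      PySem.Set.ofList_eq_self_of_nodup _ hnd]
  have hkeys1 : d1.keys = ([] : PySem.Set String) ∨ d1.keys = m.map (·.1) := by
    have h' := pv_outer_keys m gs (PySem.List.pyRange 0 ((gs.length : Int) - 1) 1) PySem.Dict.empty
    rw [← hd1, PySem.Dict.keys_empty] at h'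
    rcases h' with h | h
    · left; exact h
    · right; rw [h, hupd]
  have hkeys2 : d2.keys = m.map (·.1) := by
    rw [hd2, PySem.Dict.keys_foldl_modify_key m (fun p => p.1) []
      (fun d p => (· ++ [PySem.List.pyGetD p.2 (-1) 0])) d1]
    rcases hkeys1 with h | h
    · rw [h, hupd]
    · rw [h, pv_update_self _ _ (fun y hy => hy)]
  have hnd2 : d2.keys.Nodup := by rw [hkeys2]; exact hnd
  rw [PySem.Dict.items_eq_map_keys d2 hnd2 [], hkeys2, List.map_map]
  refine List.map_congr_left (fun p hp => ?_)
  have hfold : d2 = (m.map (fun p => (p.1, PySem.List.pyGetD p.2 (-1) 0))).foldl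
      (fun d q => d.modify q.1 [] (· ++ [q.2])) d1 := by
    rw [hd2, List.foldl_map]
  have hfilter : (m.map (fun p => (p.1, PySem.List.pyGetD p.2 (-1) 0))).filter (fun q => q.1 == p.1)
      = [(p.1, PySem.List.pyGetD p.2 (-1) 0)] := by
    rw [List.filter_map]
    simp only [Function.comp_def]
    rw [pv_filter_eq_single m hnd p.1 p.2 (by simpa using hp)]
    simp
  have h1 : d2.getD p.1 [] = d1.getD p.1 [] ++ [PySem.List.pyGetD p.2 (-1) 0] := by
    rw [hfold, PySem.Dict.getD_foldl_modify_append, hfilter]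
    simp
  have h0 : d1.getD p.1 [] = ((PySem.List.pyRange 0 ((gs.length : Int) - 1) 1).map (fun i =>
      List.replicate (PySem.List.pyGetD gs i 0 - PySem.List.pyGetD gs (i + 1) 0).toNat
        (PySem.List.pyGetD p.2 i 0))).flatten := by
    have h' := pv_outer_getD m gs hnd p.1 p.2 (by simpa using hp)
      (PySem.List.pyRange 0 ((gs.length : Int) - 1) 1) PySem.Dict.empty
    rw [← hd1] at h'
    simpa using h'
  simp only [Function.comp, h1, h0, hsched, List.map_append, pv_expand_eq gs p.2]
  simp
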